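-- pv_equiv track=rewrite | github.com/wj1224/algorithm_solve | codility/python/codility_lesson4_2.py | solution
-- ===== SOURCE A (Python) =====
-- def solution(X, A):
-- 	# write your code in Python 3.6
-- 	answer = -1
-- 	s = set()
-- 	for i, v in enumerate(A):
-- 		s.add(v)
-- 		if len(s) == X:
-- 			answer = i
-- 			break
-- 	return answer
-- ===== SOURCE B (Python) =====
-- def solution(X, A):
--     # Build value -> first-occurrence index by overwriting while scanning BACKWARDS,
--     # then sort the first-occurrence indices and pick the X-th smallest.
--     first = {}
--     for i, v in reversed(list(enumerate(A))):
--         first[v] = i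
--     idxs = sorted(first.values())
--     if X < 1 or len(idxs) < X:
--         return -1
--     return idxs[X - 1]
-- ===== Notes on version B (the rewrite author's own statement) =====
-- stated objective: alternative
-- what changed: A scans forward keeping a running distinct-count in a set and breaks the moment it reaches X; B instead scans BACKWARDS overwriting a dict so that it ends up mapping each value to its first-occurrence index, then sorts those indices and selects the X-th smallest (-1 if X < 1 or fewer than X distinct values).
import Mathlib
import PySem

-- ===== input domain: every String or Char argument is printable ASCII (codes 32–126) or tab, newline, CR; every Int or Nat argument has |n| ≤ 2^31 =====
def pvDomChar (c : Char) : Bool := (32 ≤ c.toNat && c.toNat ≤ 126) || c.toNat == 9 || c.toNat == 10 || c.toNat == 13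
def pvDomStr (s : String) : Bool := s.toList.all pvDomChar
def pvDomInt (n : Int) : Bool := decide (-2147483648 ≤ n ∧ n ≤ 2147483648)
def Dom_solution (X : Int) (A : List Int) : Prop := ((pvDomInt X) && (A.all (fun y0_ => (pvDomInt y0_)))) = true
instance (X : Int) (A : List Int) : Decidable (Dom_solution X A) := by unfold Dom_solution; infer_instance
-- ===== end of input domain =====

-- B replaces A's forward scan with a running distinct-count and early break by a backward
-- overwrite pass building a value→first-index dict, then a sort-and-select; alternative algorithm, same result.

-- ===== PORT A =====
-- the enumerate loop with its break: recursion over A carrying the index i and the set s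
def solutionGo (X : Int) : List Int → Int → PySem.Set Int → Int
  | [], _, _ => -1
  | v :: rest, i, s =>
      let s' := PySem.Set.add s v
      if (PySem.Set.len s' : Int) = X then i
      else solutionGo X rest (i + 1) s'

def solution (X : Int) (A : List Int) : Int :=
  solutionGo X A 0 PySem.Set.empty

-- ===== PORT B =====
-- Source B: 'for i, v in reversed(list(enumerate(A))): first[v] = i', then sort the values and select
def solution_alt (X : Int) (A : List Int) : Int :=
  let first := ((PySem.List.enumerate A 0).reverse).foldl
      (fun (d : PySem.Dict Int Int) (p : Int × Int) => d.insert p.2 p.1) PySem.Dict.empty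
  let idxs := PySem.List.sorted (PySem.Dict.values first) (fun x => x) false
  if X < 1 ∨ (idxs.length : Int) < X then -1
  else (PySem.List.pyGet? idxs (X - 1)).getD (-1)  -- guard makes the index in range

-- ===== PRECONDITION & SPEC =====
def Spec_solution (X : Int) (A : List Int) (out : Int) : Prop := out = solution_alt X A
instance (X : Int) (A : List Int) (out : Int) : Decidable (Spec_solution X A out) := by unfold Spec_solution; infer_instance

-- ===== CLAIM (what is proved, stated in full; the proofs are below) =====
def Claim_equal_solution : Prop := ∀ (X : Int) (A : List Int), Dom_solution X A → Spec_solution X A (solution X A)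

-- ===== LEMMAS AND PROOFS =====

-- proof-side ghost: the first-occurrence indices of A (offset i), skipping values already in S, in order
def altFirsts : List Int → Int → PySem.Set Int → List Int
  | [], _, _ => []
  | v :: rest, i, seen =>
      if PySem.Set.contains seen v then altFirsts rest (i + 1) seen
      else i :: altFirsts rest (i + 1) (PySem.Set.add seen v)

-- proof-side ghost: the dict Source B builds, as a structural recursion
def backDict : List Int → Int → PySem.Dict Int Int
  | [], _ => PySem.Dict.empty
  | v :: rest, i => (backDict rest (i + 1)).insert v i

theorem backDict_eq (A : List Int) :
    ∀ i, ((PySem.List.enumerate A i).reverse).foldl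
      (fun (d : PySem.Dict Int Int) (p : Int × Int) => d.insert p.2 p.1) PySem.Dict.empty
      = backDict A i := by
  induction A with
  | nil => intro i; simp [PySem.List.enumerate_nil, backDict]
  | cons v rest ih =>
      intro i
      rw [PySem.List.enumerate_cons]
      simp only [List.reverse_cons, List.foldl_append, List.foldl_cons, List.foldl_nil]
      rw [ih]
      rfl

theorem get?_backDict (A : List Int) :
    ∀ i k, (backDict A i).get? k = (PySem.List.index? A k).map (fun j => i + (j : Int)) := by
  induction A with
  | nil => intro i k; simp [backDict, PySem.Dict.get?_empty, PySem.List.index?]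
  | cons v rest ih =>
      intro i k
      by_cases h : k = v
      · subst h
        rw [PySem.List.index?_cons_self]
        simp [backDict, PySem.Dict.get?_insert_self]
      · rw [show backDict (v :: rest) i = (backDict rest (i + 1)).insert v i from rfl,
            PySem.Dict.get?_insert, if_neg h,
            PySem.List.index?_cons_of_ne rest (Ne.symm h), ih]
        cases PySem.List.index? rest k with
        | none => simp
        | some j => simp; omega

theorem nodup_keys_backDict (A : List Int) : ∀ i, (backDict A i).keys.Nodup := by
  induction A with
  | nil => intro i; exact PySem.Dict.nodup_keys_empty
  | cons v rest ih => intro i; exact PySem.Dict.nodup_keys_insert _ _ _ (ih (i + 1))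

theorem altFirsts_lb : ∀ (A : List Int) (i : Int) (S : PySem.Set Int) (w : Int),
    w ∈ altFirsts A i S → i ≤ w := by
  intro A
  induction A with
  | nil => intro i S w h; simp [altFirsts] at h
  | cons v rest ih =>
      intro i S w h
      simp only [altFirsts] at h
      split at h
      · have := ih (i + 1) S w h; omega
      · rcases List.mem_cons.mp h with h | h
        · omega
        · have := ih (i + 1) _ w h; omega

theorem altFirsts_pairwise : ∀ (A : List Int) (i : Int) (S : PySem.Set Int),
    (altFirsts A i S).Pairwise (· < ·) := by
  intro A
  induction A with
  | nil => intro i S; simp [altFirsts]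
  | cons v rest ih =>
      intro i S
      simp only [altFirsts]
      split
      · exact ih (i + 1) S
      · refine List.pairwise_cons.mpr ⟨?_, ih (i + 1) _⟩
        intro w hw
        have := altFirsts_lb rest (i + 1) _ w hw
        omega

theorem mem_altFirsts : ∀ (A : List Int) (i : Int) (S : PySem.Set Int) (w : Int),
    w ∈ altFirsts A i S ↔
      ∃ k j, ¬ (PySem.Set.contains S k = true) ∧ PySem.List.index? A k = some j ∧ w = i + (j : Int) := by
  intro A
  induction A with
  | nil =>
      intro i S w
      simp [altFirsts, PySem.List.index?_eq_idxOf?]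
  | cons v rest ih =>
      intro i S w
      simp only [altFirsts]
      by_cases hc : PySem.Set.contains S v = true
      · rw [if_pos hc, ih]
        constructor
        · rintro ⟨k, j, hk, hidx, hw⟩
          have hkv : v ≠ k := by rintro rfl; exact hk hc
          refine ⟨k, j + 1, hk, ?_, by push_cast; omega⟩
          rw [PySem.List.index?_cons_of_ne rest hkv, hidx]
          rfl
        · rintro ⟨k, j, hk, hidx, hw⟩
          have hkv : v ≠ k := by rintro rfl; exact hk hc
          rw [PySem.List.index?_cons_of_ne rest hkv] at hidx
          cases hj : PySem.List.index? rest k with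
          | none => rw [hj] at hidx; simp at hidx
          | some j' =>
              rw [hj] at hidx
              simp only [Option.map_some, Option.some.injEq] at hidx
              exact ⟨k, j', hk, hj, by subst hidx; push_cast at hw ⊢; omega⟩
      · rw [if_neg hc]
        simp only [List.mem_cons]
        rw [ih]
        constructor
        · rintro (rfl | ⟨k, j, hk, hidx, hw⟩)
          · exact ⟨v, 0, by simpa using hc, by rw [PySem.List.index?_cons_self], by omega⟩
          · simp only [PySem.Set.contains_iff, PySem.Set.mem_add, not_or] at hk
            have hkS : ¬ (PySem.Set.contains S k = true) := by
              rw [PySem.Set.contains_iff]; exact hk.1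
            have hkv : v ≠ k := fun hv => hk.2 hv.symm
            refine ⟨k, j + 1, hkS, ?_, by push_cast; omega⟩
            rw [PySem.List.index?_cons_of_ne rest hkv, hidx]
            rfl
        · rintro ⟨k, j, hk, hidx, hw⟩
          by_cases hkv : k = v
          · subst hkv
            rw [PySem.List.index?_cons_self] at hidx
            simp only [Option.some.injEq] at hidx
            left
            omega
          · right
            rw [PySem.List.index?_cons_of_ne rest (Ne.symm hkv)] at hidx
            cases hj : PySem.List.index? rest k with
            | none => rw [hj] at hidx; simp at hidx
            | some j' =>
                rw [hj] at hidx
                simp only [Option.map_some, Option.some.injEq] at hidx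
                refine ⟨k, j', ?_, hj, by subst hidx; push_cast at hw ⊢; omega⟩
                simp only [PySem.Set.contains_iff, PySem.Set.mem_add, not_or]
                exact ⟨by rw [PySem.Set.contains_iff] at hk; exact hk, hkv⟩

theorem values_perm_altFirsts (A : List Int) :
    (altFirsts A 0 PySem.Set.empty).Perm ((backDict A 0).values) := by
  have hnd := nodup_keys_backDict A 0
  have hget := get?_backDict A 0
  rw [PySem.Dict.values_eq_map_keys _ hnd 0]
  refine (List.perm_ext_iff_of_nodup ?_ ?_).mpr ?_
  · exact (altFirsts_pairwise A 0 PySem.Set.empty).imp fun h => ne_of_lt h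
  · refine List.Nodup.map_on ?_ hnd
    intro k hkmem k' hkmem' heq
    have h1 : (backDict A 0).get? k ≠ none := fun hnone =>
      (PySem.Dict.get?_eq_none_iff_not_mem_keys _ _).mp hnone hkmem
    have h2 : (backDict A 0).get? k' ≠ none := fun hnone =>
      (PySem.Dict.get?_eq_none_iff_not_mem_keys _ _).mp hnone hkmem'
    rw [hget k] at h1
    rw [hget k'] at h2
    cases hj : PySem.List.index? A k with
    | none => rw [hj] at h1; simp at h1
    | some j =>
        cases hj' : PySem.List.index? A k' with
        | none => rw [hj'] at h2; simp at h2
        | some j' =>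
            rw [PySem.Dict.getD_eq_get?_getD, PySem.Dict.getD_eq_get?_getD, hget k, hget k', hj, hj'] at heq
            simp at heq
            have hjj : j = j' := by omega
            subst hjj
            obtain ⟨hlt, hA, -⟩ := PySem.List.getElem_of_index?_eq_some hj
            obtain ⟨hlt', hA', -⟩ := PySem.List.getElem_of_index?_eq_some hj'
            rw [← hA, ← hA']
  · intro w
    rw [mem_altFirsts]
    constructor
    · rintro ⟨k, j, -, hidx, hw⟩
      refine List.mem_map.mpr ⟨k, ?_, ?_⟩
      · by_contra hk
        have h0 := (PySem.Dict.get?_eq_none_iff_not_mem_keys ((backDict A 0)) k).mpr hk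
        rw [hget k, hidx] at h0
        simp at h0
      · rw [PySem.Dict.getD_eq_get?_getD, hget k, hidx]
        simp [hw]
    · intro hw
      obtain ⟨k, hkmem, hkw⟩ := List.mem_map.mp hw
      have h1 : (backDict A 0).get? k ≠ none := fun hnone =>
        (PySem.Dict.get?_eq_none_iff_not_mem_keys _ _).mp hnone hkmem
      rw [hget k] at h1
      cases hj : PySem.List.index? A k with
      | none => rw [hj] at h1; simp at h1
      | some j =>
          refine ⟨k, j, by simp [PySem.Set.empty], hj, ?_⟩
          rw [PySem.Dict.getD_eq_get?_getD, hget k, hj] at hkw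
          simp at hkw
          omega

-- A's loop with X ≤ 0 never stops early
theorem solutionGo_nonpos (X : Int) (hX : X ≤ 0) :
    ∀ (rest : List Int) (i : Int) (s : PySem.Set Int), solutionGo X rest i s = -1 := by
  intro rest
  induction rest with
  | nil => intro i s; simp [solutionGo]
  | cons v r ih =>
      intro i s
      simp only [solutionGo]
      have hpos : 0 < PySem.Set.len (PySem.Set.add s v) := by
        by_cases h : v ∈ s
        · rw [PySem.Set.add_of_mem h]
          cases s with
          | nil => simp at h
          | cons a t => simp [PySem.Set.len]
        · rw [PySem.Set.add_of_not_mem h]; simp [PySem.Set.len]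
      have : ¬ ((PySem.Set.len (PySem.Set.add s v) : Int) = X) := by
        intro h; omega
      simp only [this, if_false]
      exact ih _ _

-- Main invariant: while len s < X, A's loop returns the (X - len s - 1)-th entry of
-- the remaining first-occurrence indices (or -1 if there are too few).
theorem solutionGo_eq (X : Int) :
    ∀ (rest : List Int) (i : Int) (s : PySem.Set Int),
      (PySem.Set.len s : Int) < X →
      solutionGo X rest i s =
        ((altFirsts rest i s)[(X - PySem.Set.len s - 1).toNat]?).getD (-1) := by
  intro rest
  induction rest with
  | nil => intro i s _; simp [solutionGo, altFirsts]
  | cons v r ih =>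
      intro i s hlt
      simp only [solutionGo, altFirsts]
      by_cases hc : v ∈ s
      · rw [PySem.Set.add_of_mem hc, if_pos ((PySem.Set.contains_iff s v).mpr hc)]
        have : ¬ ((PySem.Set.len s : Int) = X) := by omega
        simp only [this, if_false]
        exact ih (i + 1) s hlt
      · have hlen : PySem.Set.len (PySem.Set.add s v) = PySem.Set.len s + 1 := by
          rw [PySem.Set.add_of_not_mem hc]; simp [PySem.Set.len]
        have hcf : PySem.Set.contains s v = false := by
          by_contra h
          exact hc ((PySem.Set.contains_iff s v).mp (by simpa using h))
        rw [hlen, hcf]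
        simp only [Bool.false_eq_true, if_false]
        by_cases hx : ((PySem.Set.len s : Int) + 1 = X)
        · rw [if_pos (by omega)]
          have h0 : (X - PySem.Set.len s - 1).toNat = 0 := by omega
          rw [h0]
          simp
        · rw [if_neg (by omega)]
          have hlt' : ((PySem.Set.len (PySem.Set.add s v)) : Int) < X := by omega
          rw [ih (i + 1) (PySem.Set.add s v) (by omega)]
          rw [hlen]
          have hk : (X - PySem.Set.len s - 1).toNat =
              (X - (PySem.Set.len s + 1) - 1).toNat + 1 := by omega
          rw [hk]
          simp

-- ===== VERDICT (by name: the statement is the Claim_ definition above) =====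
theorem solution_spec : Claim_equal_solution := by
  unfold Claim_equal_solution
  intro X A _
  unfold Spec_solution
  simp only [solution, solution_alt, backDict_eq]
  rw [PySem.List.sorted_eq_of_perm_of_pairwise_lt _ _ _ (values_perm_altFirsts A)
        (by simpa using altFirsts_pairwise A 0 PySem.Set.empty)]
  by_cases hX : X < 1
  · rw [if_pos (Or.inl hX)]
    exact solutionGo_nonpos X (by omega) A 0 _
  · have hlen0 : (PySem.Set.len (PySem.Set.empty : PySem.Set Int) : Int) = 0 := by
      simp [PySem.Set.len, PySem.Set.empty]
    rw [solutionGo_eq X A 0 PySem.Set.empty (by omega), hlen0]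
    set f := altFirsts A 0 PySem.Set.empty with hf
    by_cases hsz : (f.length : Int) < X
    · have hnone : f[(X - 0 - 1).toNat]? = none := by
        apply List.getElem?_eq_none
        omega
      rw [hnone, if_pos (Or.inr hsz)]
      rfl
    · have hidx : PySem.List.pyGet? f (X - 1) = f[(X - 1).toNat]? :=
        PySem.List.pyGet?_of_nonneg f (by omega)
      rw [if_neg (by omega), hidx]
      congr 2
      omega
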